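-- pv_equiv track=rewrite | github.com/vlavlaz/PyEge | DasAlgos/ege/task9/_5.py | check
-- ===== SOURCE A (Python) =====
-- def check(stroke):
--     uniq = stroke.copy()
--     rep = []
--     for i in range(0, 8):
--         for j in range(i+1, 8):
--             if stroke[i] == stroke[j] and not stroke[i] in rep:
--                 rep.append(stroke[i])
--     for x in rep:
--         while x in uniq:
--             uniq.remove(x)
--     if len(rep) < 2:
--         return False
--     sur = 0
--     suq = 0
--     for x in rep:
--         sur += x
--     for x in uniq:
--         suq += x
--     if sur < suq:
--         return True
--     else:
--         return False
-- ===== SOURCE B (Python) =====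
-- def check(stroke):
--     seen = set()
--     rep = []
--     for i in range(8):
--         x = stroke[i]
--         if x in seen and x not in rep:
--             rep.append(x)
--         seen.add(x)
--     if len(rep) < 2:
--         return False
--     sur = sum(rep)
--     suq = sum(x for x in stroke if x not in rep)
--     return sur < suq
-- ===== Notes on version B (the rewrite author's own statement) =====
-- stated objective: simpler
-- what changed: Replaces A's O(8^2) nested pairwise scan plus repeated list.remove passes with a single seen/rep pass over the first 8 items and one filtered-sum pass over the list.
import Mathlib
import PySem

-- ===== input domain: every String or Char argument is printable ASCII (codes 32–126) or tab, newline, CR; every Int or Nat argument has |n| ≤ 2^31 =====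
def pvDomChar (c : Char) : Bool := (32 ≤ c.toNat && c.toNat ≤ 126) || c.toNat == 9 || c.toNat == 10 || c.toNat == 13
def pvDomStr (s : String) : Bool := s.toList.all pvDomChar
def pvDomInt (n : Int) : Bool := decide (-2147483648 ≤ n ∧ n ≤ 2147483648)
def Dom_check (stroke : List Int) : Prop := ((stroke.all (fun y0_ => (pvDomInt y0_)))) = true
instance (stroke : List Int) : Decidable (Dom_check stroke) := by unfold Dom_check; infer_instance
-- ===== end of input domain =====

-- B replaces A's O(8²) pairwise duplicate scan and repeated list.remove passes by one
-- seen/rep pass over the first 8 items and a single filtered sum over the list (objective: simpler).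

-- ===== PORT A =====
-- 'while x in uniq: uniq.remove(x)' — remove first occurrence (List.erase) until x is gone
def whileRemoveA (x : Int) (u : List Int) : List Int :=
  if h : x ∈ u then whileRemoveA x (u.erase x) else u
termination_by u.length
decreasing_by
  have h1 : (u.erase x).length = u.length - 1 := List.length_erase_of_mem h
  have h2 : 0 < u.length := List.length_pos_of_mem h
  omega

def check (stroke : List Int) : Bool :=
  let rep : List Int :=
    (PySem.List.pyRange 0 8 1).foldl (fun rep i =>
      (PySem.List.pyRange (i+1) 8 1).foldl (fun rep j =>
        if ((PySem.List.pyGet? stroke i).getD 0 == (PySem.List.pyGet? stroke j).getD 0)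
            && !(rep.contains ((PySem.List.pyGet? stroke i).getD 0))
        then rep ++ [(PySem.List.pyGet? stroke i).getD 0]
        else rep) rep) []
  let uniq : List Int := rep.foldl (fun u x => whileRemoveA x u) stroke
  if rep.length < 2 then false
  else
    let sur : Int := rep.foldl (fun s x => s + x) 0
    let suq : Int := uniq.foldl (fun s x => s + x) 0
    decide (sur < suq)

-- ===== PORT B =====
def check_alt (stroke : List Int) : Bool :=
  let p : PySem.Set Int × List Int :=
    (PySem.List.pyRange 0 8 1).foldl (fun (p : PySem.Set Int × List Int) i =>
      let x := (PySem.List.pyGet? stroke i).getD 0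
      let rep := if PySem.Set.contains p.1 x && !(p.2.contains x) then p.2 ++ [x] else p.2
      (PySem.Set.add p.1 x, rep)) (PySem.Set.empty, [])
  let rep : List Int := p.2
  if rep.length < 2 then false
  else
    let sur : Int := rep.foldl (fun s x => s + x) 0
    let suq : Int := (stroke.filter (fun x => !(rep.contains x))).foldl (fun s x => s + x) 0
    decide (sur < suq)

-- ===== PRECONDITION & SPEC =====
-- Python A indexes stroke[0..7], so it raises IndexError whenever len(stroke) < 8; exactly those inputs are excluded.
def Pre_check (stroke : List Int) : Prop := 8 ≤ stroke.length
instance (stroke : List Int) : Decidable (Pre_check stroke) := by unfold Pre_check; infer_instance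
def pvWitness_check : List Int := [1, 1, 2, 2, 3, 4, 5, 6]

def Spec_check (stroke : List Int) (out : Bool) : Prop := out = check_alt stroke
instance (stroke : List Int) (out : Bool) : Decidable (Spec_check stroke out) := by unfold Spec_check; infer_instance

-- ===== CLAIM (what is proved, stated in full; the proofs are below) =====
def Claim_equal_check : Prop := ∀ (stroke : List Int), Dom_check stroke → Pre_check stroke → Spec_check stroke (check stroke)

-- ===== LEMMAS AND PROOFS =====

-- the Int value stroke[i] (total form; inside Pre_ it is the real element)
def gI (stroke : List Int) (i : Int) : Int := (PySem.List.pyGet? stroke i).getD 0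

theorem gI_def (stroke : List Int) (i : Int) :
    (PySem.List.pyGet? stroke i).getD 0 = gI stroke i := rfl

-- structural spec of A's double loop over the values of the first 8 entries
def repA (acc : List Int) : List Int → List Int
  | [] => acc
  | x :: rest => repA (if rest.contains x && !(acc.contains x) then acc ++ [x] else acc) rest

-- structural spec of B's seen/rep single pass
def repB (seen : PySem.Set Int) (rep : List Int) : List Int → List Int
  | [] => rep
  | x :: rest =>
      repB (PySem.Set.add seen x)
        (if PySem.Set.contains seen x && !(rep.contains x) then rep ++ [x] else rep) rest

def seenB (seen : PySem.Set Int) : List Int → PySem.Set Int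
  | [] => seen
  | x :: rest => seenB (PySem.Set.add seen x) rest

-- A's inner loop appends x once iff x occurs among the scanned values and is not yet in rep
theorem innerA (f : Int → Int) (x : Int) (js : List Int) (rep : List Int) :
    js.foldl (fun rep j => if (x == f j) && !(rep.contains x) then rep ++ [x] else rep) rep
      = if (js.map f).contains x && !(rep.contains x) then rep ++ [x] else rep := by
  induction js generalizing rep with
  | nil => simp
  | cons j js ih =>
    simp only [List.foldl_cons, List.map_cons]
    by_cases hr : x ∈ rep
    · rw [if_neg (by simp [hr]), ih, if_neg (by simp [hr]), if_neg (by simp [hr])]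
    · by_cases hx : x = f j
      · rw [if_pos (by subst hx; simp [hr]), ih, if_neg (by simp), if_pos (by subst hx; simp [hr])]
      · rw [if_neg (by simp [hx]), ih]
        have hcc : (f j :: List.map f js).contains x = (List.map f js).contains x := by
          simp [hx]
        simp only [hcc]

theorem bridgeA (stroke : List Int) :
    ∀ (n : Nat) (a : Int) (acc : List Int), a + n = 8 →
      (PySem.List.pyRange a 8 1).foldl (fun rep i =>
        (PySem.List.pyRange (i+1) 8 1).foldl (fun rep j =>
          if (gI stroke i == gI stroke j) && !(rep.contains (gI stroke i))
          then rep ++ [gI stroke i]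
          else rep) rep) acc
      = repA acc ((PySem.List.pyRange a 8 1).map (gI stroke)) := by
  intro n
  induction n with
  | zero =>
    intro a acc ha
    rw [PySem.List.pyRange_one_eq_nil (by omega)]
    simp [repA]
  | succ m ih =>
    intro a acc ha
    rw [PySem.List.pyRange_one_cons (by omega)]
    simp only [List.foldl_cons, List.map_cons]
    rw [innerA (gI stroke) (gI stroke a) _ acc]
    simp only [repA]
    rw [ih (a+1) _ (by omega)]

theorem bridgeB (stroke : List Int) :
    ∀ (n : Nat) (a : Int) (s : PySem.Set Int) (r : List Int), a + n = 8 →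
      (PySem.List.pyRange a 8 1).foldl (fun (p : PySem.Set Int × List Int) i =>
        let x := gI stroke i
        let rep := if PySem.Set.contains p.1 x && !(p.2.contains x) then p.2 ++ [x] else p.2
        (PySem.Set.add p.1 x, rep)) (s, r)
      = (seenB s ((PySem.List.pyRange a 8 1).map (gI stroke)),
         repB s r ((PySem.List.pyRange a 8 1).map (gI stroke))) := by
  intro n
  induction n with
  | zero =>
    intro a s r ha
    rw [PySem.List.pyRange_one_eq_nil (by omega)]
    simp [seenB, repB]
  | succ m ih =>
    intro a s r ha
    rw [PySem.List.pyRange_one_cons (by omega)]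
    simp only [List.foldl_cons, List.map_cons, seenB, repB]
    rw [ih (a+1) _ _ (by omega)]

theorem mem_repA (t : List Int) : ∀ (acc : List Int) (v : Int),
    v ∈ repA acc t ↔ v ∈ acc ∨ 2 ≤ t.count v := by
  induction t with
  | nil => intro acc v; simp [repA]
  | cons x rest ih =>
    intro acc v
    simp only [repA]
    rw [ih]
    by_cases hcond : (rest.contains x && !(acc.contains x)) = true
    · rw [if_pos hcond]
      have hxr : x ∈ rest := (by simpa using hcond : x ∈ rest ∧ x ∉ acc).1
      have h1 : 1 ≤ rest.count x := List.count_pos_iff.mpr hxr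
      by_cases hvx : v = x
      · subst hvx
        rw [List.count_cons_self]
        constructor
        · intro _; right; omega
        · intro _; left; simp
      · have hm : v ∈ acc ++ [x] ↔ v ∈ acc := by simp [hvx]
        have hxv : ¬ x = v := fun h => hvx h.symm
        rw [hm]
        simp [hxv]
    · rw [if_neg hcond]
      have hor : x ∈ rest → x ∈ acc := by
        intro hxr
        by_contra hxa
        exact hcond (by simp [hxr, hxa])
      by_cases hvx : v = x
      · subst hvx
        rw [List.count_cons_self]
        by_cases hva : v ∈ acc
        · simp [hva]
        · have hvr : v ∉ rest := fun h => hva (hor h)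
          rw [List.count_eq_zero.mpr hvr]
          simp
      · have hxv : ¬ x = v := fun h => hvx h.symm
        simp [hxv]

theorem nodup_repA (t : List Int) : ∀ (acc : List Int), acc.Nodup → (repA acc t).Nodup := by
  induction t with
  | nil => intro acc h; simpa [repA] using h
  | cons x rest ih =>
    intro acc h
    simp only [repA]
    apply ih
    by_cases hcond : (rest.contains x && !(acc.contains x)) = true
    · rw [if_pos hcond]
      have hxa : x ∉ acc := (by simpa using hcond : x ∈ rest ∧ x ∉ acc).2
      refine h.append (List.nodup_singleton x) ?_
      intro a ha hax
      obtain rfl := List.mem_singleton.mp hax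
      exact hxa ha
    · rw [if_neg hcond]; exact h

theorem mem_repB (t : List Int) : ∀ (s : PySem.Set Int) (r : List Int) (v : Int),
    v ∈ repB s r t ↔ v ∈ r ∨ (v ∈ s ∧ v ∈ t) ∨ 2 ≤ t.count v := by
  induction t with
  | nil => intro s r v; simp [repB]
  | cons x rest ih =>
    intro s r v
    simp only [repB]
    rw [ih]
    have hr' : v ∈ (if (PySem.Set.contains s x && !(r.contains x)) = true then r ++ [x] else r)
        ↔ v ∈ r ∨ (v = x ∧ x ∈ s ∧ x ∉ r) := by
      by_cases hc : (PySem.Set.contains s x && !(r.contains x)) = true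
      · obtain ⟨hs, hxr⟩ : x ∈ s ∧ x ∉ r := by simpa using hc
        rw [if_pos hc]
        simp [hs, hxr]
      · rw [if_neg hc]
        have : ¬ (x ∈ s ∧ x ∉ r) := by
          intro ⟨hs, hxr⟩
          exact hc (by simp [hs, hxr])
        tauto
    rw [hr']
    by_cases hvx : v = x
    · subst hvx
      rw [List.count_cons_self]
      constructor
      · rintro ((hv | ⟨_, hs, _⟩) | ⟨_, hrest⟩ | hcnt)
        · exact .inl hv
        · exact .inr (.inl ⟨hs, by simp⟩)
        · have := List.count_pos_iff.mpr hrest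
          right; right; omega
        · right; right; omega
      · rintro (hv | ⟨hs, _⟩ | hcnt)
        · exact .inl (.inl hv)
        · by_cases hvr : v ∈ r
          · exact .inl (.inl hvr)
          · exact .inl (.inr ⟨rfl, hs, hvr⟩)
        · rcases Nat.lt_or_ge (rest.count v) 2 with hlt | hge
          · right; left
            exact ⟨by rw [PySem.Set.mem_add]; right; rfl, List.count_pos_iff.mp (by omega)⟩
          · right; right; exact hge
    · have hne : ¬ (v = x ∧ x ∈ s ∧ x ∉ r) := fun h => hvx h.1
      have hadd : v ∈ PySem.Set.add s x ↔ v ∈ s := by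
        rw [PySem.Set.mem_add]; simp [hvx]
      have hmx : v ∈ x :: rest ↔ v ∈ rest := by simp [hvx]
      have hxv : ¬ x = v := fun h => hvx h.symm
      have hcc : List.count v (x :: rest) = List.count v rest := by
        simp [hxv]
      rw [hcc, hadd, hmx]
      tauto

theorem nodup_repB (t : List Int) : ∀ (s : PySem.Set Int) (r : List Int), r.Nodup → (repB s r t).Nodup := by
  induction t with
  | nil => intro s r h; simpa [repB] using h
  | cons x rest ih =>
    intro s r h
    simp only [repB]
    apply ih
    by_cases hcond : (PySem.Set.contains s x && !(r.contains x)) = true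
    · rw [if_pos hcond]
      have hxr : x ∉ r := (by simpa using hcond : x ∈ s ∧ x ∉ r).2
      refine h.append (List.nodup_singleton x) ?_
      intro a ha hax
      obtain rfl := List.mem_singleton.mp hax
      exact hxr ha
    · rw [if_neg hcond]; exact h

-- while-remove = filter
theorem filter_erase_of_self (x : Int) : ∀ (u : List Int),
    (u.erase x).filter (fun v => v != x) = u.filter (fun v => v != x) := by
  intro u
  induction u with
  | nil => simp
  | cons a u ih =>
    by_cases hax : a = x
    · subst hax; simp [List.erase_cons_head]
    · rw [List.erase_cons_tail (by simpa using hax)]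
      simp [hax, ih]

theorem whileRemoveA_eq_filter (x : Int) (u : List Int) :
    whileRemoveA x u = u.filter (fun v => v != x) := by
  induction u using whileRemoveA.induct x with
  | case1 u h ih =>
    rw [whileRemoveA, dif_pos h, ih, filter_erase_of_self]
  | case2 u h =>
    rw [whileRemoveA, dif_neg h]
    exact (List.filter_eq_self.mpr (fun a ha => by simp; rintro rfl; exact h ha)).symm

theorem foldl_whileRemove (rep : List Int) : ∀ (l : List Int),
    rep.foldl (fun u x => whileRemoveA x u) l = l.filter (fun v => !(rep.contains v)) := by
  induction rep with
  | nil => intro l; simp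
  | cons x rest ih =>
    intro l
    simp only [List.foldl_cons]
    rw [ih, whileRemoveA_eq_filter, List.filter_filter]
    apply List.filter_congr
    intro a _
    by_cases h1 : a = x <;> by_cases h2 : a ∈ rest <;> simp [h1, h2]

theorem foldl_add_eq_sum : ∀ (l : List Int) (s : Int), l.foldl (fun s x => s + x) s = s + l.sum := by
  intro l
  induction l with
  | nil => simp
  | cons x xs ih => intro s; simp [ih, List.sum_cons]; ring

theorem check_eq_check_alt (stroke : List Int) : check stroke = check_alt stroke := by
  unfold check check_alt
  simp only [gI_def]
  rw [bridgeA stroke 8 0 [] (by omega), bridgeB stroke 8 0 PySem.Set.empty [] (by omega)]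
  set T := (PySem.List.pyRange 0 8 1).map (gI stroke) with hT
  set RA := repA [] T with hRA
  set RB := repB PySem.Set.empty [] T with hRB
  have hmem : ∀ v, v ∈ RA ↔ v ∈ RB := by
    intro v
    rw [hRA, hRB, mem_repA, mem_repB]
    simp [PySem.Set.empty]
  have hperm : RA.Perm RB := by
    rw [List.perm_ext_iff_of_nodup (nodup_repA T [] (by simp)) (nodup_repB T PySem.Set.empty [] (by simp))]
    exact hmem
  have hsur : RA.foldl (fun s x => s + x) 0 = RB.foldl (fun s x => s + x) 0 := by
    rw [foldl_add_eq_sum, foldl_add_eq_sum, hperm.sum_eq]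
  have huniq : RA.foldl (fun u x => whileRemoveA x u) stroke
      = stroke.filter (fun x => !(RB.contains x)) := by
    rw [foldl_whileRemove]
    exact List.filter_congr (fun a _ => by simp [hmem a])
  rw [hperm.length_eq, hsur, huniq]

-- ===== VERDICT (by name: the statement is the Claim_ definition above) =====
theorem check_spec : Claim_equal_check := by
  intro stroke _ _
  unfold Spec_check
  exact check_eq_check_alt stroke
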